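-- pv_equiv track=rewrite | github.com/hugohadfield/ObjectArray | ObjectArray.py | get_convolution_indices
-- ===== SOURCE A (Python) =====
-- def get_convolution_indices(iteration,shape):
--     reversed_shape = list(reversed(shape))
--     dimensionality = len(shape)
--     if dimensionality == 1:
--         return [iteration]
--     else:
--         indicies = shape[:]
--         remaining_iterations = iteration
--         for n in range(len(shape)):
--             indicies[n] = remaining_iterations % reversed_shape[n]
--             remaining_iterations = (remaining_iterations -indicies[n])//reversed_shape[n]
--         return list(reversed(indicies))
-- ===== SOURCE B (Python) =====
-- def get_convolution_indices(iteration, shape):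
--     if len(shape) == 1:
--         return [iteration]
--     strides = []
--     p = 1
--     for s in reversed(shape):
--         strides.append(p)
--         p *= s
--     strides.reverse()
--     return [(iteration // st) % s for st, s in zip(strides, shape)]
-- ===== Notes on version B (the rewrite author's own statement) =====
-- stated objective: idiomatic
-- what changed: Replaces the running-remainder loop that mutates an index list and double-reverses it with the standard unravel-index formulation: precompute a stride table (reverse scan of products), then one comprehension indices[i] = (iteration // stride[i]) % shape[i].
-- outside the precondition, e.g. on get_convolution_indices(-41, [5, 1, -2, -2]): A returns [0, 0, 0, -1], B returns [4, 0, 0, -1]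
import Mathlib
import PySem

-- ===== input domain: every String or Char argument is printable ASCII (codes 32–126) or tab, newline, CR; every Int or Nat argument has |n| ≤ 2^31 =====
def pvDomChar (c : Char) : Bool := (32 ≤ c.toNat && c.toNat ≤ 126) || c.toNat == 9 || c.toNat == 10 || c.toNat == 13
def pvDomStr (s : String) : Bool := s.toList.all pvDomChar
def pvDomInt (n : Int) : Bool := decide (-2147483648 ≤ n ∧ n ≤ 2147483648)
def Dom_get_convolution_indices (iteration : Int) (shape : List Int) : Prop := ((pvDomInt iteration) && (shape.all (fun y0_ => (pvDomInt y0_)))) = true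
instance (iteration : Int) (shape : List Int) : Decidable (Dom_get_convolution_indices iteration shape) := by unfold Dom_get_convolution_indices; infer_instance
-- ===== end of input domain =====

-- B replaces A's running-remainder loop (index-mutated list, double reverse) with a
-- precomputed stride table and one pass (iteration // stride[i]) % shape[i]; idiomatic, same cost.

-- ===== PORT A =====
def get_convolution_indices (iteration : Int) (shape : List Int) : List Int :=
  let reversed_shape := shape.reverse
  let dimensionality := shape.length
  if dimensionality = 1 then [iteration]
  else
    -- for n in range(len(shape)): indicies[n] = r % reversed_shape[n]; r = (r - indicies[n]) // reversed_shape[n]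
    let res := (PySem.List.pyRange 0 (shape.length : Int) 1).foldl
      (fun (st : List Int × Int) n =>
        let s := PySem.List.pyGetD reversed_shape n 0   -- reversed_shape[n]; n always in range here
        let d := PySem.Int.mod st.2 s
        (st.1.set n.toNat d, PySem.Int.floordiv (st.2 - d) s))
      (shape, iteration)           -- indicies = shape[:], remaining_iterations = iteration
    res.1.reverse

-- ===== PORT B =====
def get_convolution_indices_alt (iteration : Int) (shape : List Int) : List Int :=
  if shape.length = 1 then [iteration]
  else
    -- strides = []; p = 1; for s in reversed(shape): strides.append(p); p *= s
    let sp := shape.reverse.foldl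
      (fun (st : List Int × Int) s => (st.1 ++ [st.2], st.2 * s)) ([], 1)
    let strides := sp.1.reverse    -- strides.reverse()
    (strides.zip shape).map (fun q => PySem.Int.mod (PySem.Int.floordiv iteration q.1) q.2)

-- ===== PRECONDITION & SPEC =====
-- Pre_ restricts shape to the natural domain of array shapes, all extents ≥ 1 (the
-- one-dimensional branch returns [iteration] untouched, so any single-entry shape is kept):
-- on a zero extent A raises ZeroDivisionError, and on negative extents A's negative-radix
-- digits are an accident of Python's sign-of-divisor modulo that no caller of an
-- unravel-index helper relies on.
def Pre_get_convolution_indices (iteration : Int) (shape : List Int) : Prop :=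
  shape.length = 1 ∨ ∀ s ∈ shape, 1 ≤ s
instance (iteration : Int) (shape : List Int) : Decidable (Pre_get_convolution_indices iteration shape) := by unfold Pre_get_convolution_indices; infer_instance

def pvWitness_get_convolution_indices : Int × List Int := (29, [2, 3, 4])

def Spec_get_convolution_indices (iteration : Int) (shape : List Int) (out : List Int) : Prop := out = get_convolution_indices_alt iteration shape
instance (iteration : Int) (shape : List Int) (out : List Int) : Decidable (Spec_get_convolution_indices iteration shape out) := by unfold Spec_get_convolution_indices; infer_instance

-- ===== CLAIM (what is proved, stated in full; the proofs are below) =====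
def Claim_equal_get_convolution_indices : Prop := ∀ (iteration : Int) (shape : List Int), Dom_get_convolution_indices iteration shape → Pre_get_convolution_indices iteration shape → Spec_get_convolution_indices iteration shape (get_convolution_indices iteration shape)

-- ===== LEMMAS AND PROOFS =====

-- the sequence of mixed-radix digits A's loop produces, over the reversed shape
def seqDigits : Int → List Int → List Int
  | _, [] => []
  | r, s :: t => PySem.Int.mod r s :: seqDigits (PySem.Int.floordiv (r - PySem.Int.mod r s) s) t

-- the stride prefix products B accumulates, over the reversed shape
def pfx : Int → List Int → List Int
  | _, [] => []
  | p, s :: t => p :: pfx (p * s) t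

lemma pfx_length (p : Int) (rs : List Int) : (pfx p rs).length = rs.length := by
  induction rs generalizing p with
  | nil => rfl
  | cons s t ih => simp [pfx, ih]

-- A's subtract-then-floordiv step is plain floor division
lemma step_fdiv (r s : Int) (hs : 1 ≤ s) :
    PySem.Int.floordiv (r - PySem.Int.mod r s) s = PySem.Int.floordiv r s := by
  have h : r - PySem.Int.mod r s = PySem.Int.floordiv r s * s := by
    have := PySem.Int.floordiv_mul_add_mod r s; omega
  rw [h, PySem.Int.floordiv_eq_ediv_of_pos (show (0:Int) < s by omega)]
  exact Int.mul_ediv_cancel _ (by omega)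

lemma fdiv_fdiv (x p s : Int) (hp : 1 ≤ p) (hs : 1 ≤ s) :
    PySem.Int.floordiv (PySem.Int.floordiv x p) s = PySem.Int.floordiv x (p * s) := by
  rw [PySem.Int.floordiv_eq_ediv_of_pos (show (0:Int) < s by omega),
      PySem.Int.floordiv_eq_ediv_of_pos (show (0:Int) < p by omega),
      PySem.Int.floordiv_eq_ediv_of_pos (show (0:Int) < p * s by positivity)]
  exact Int.ediv_ediv_of_nonneg (by omega)

lemma seqDigits_eq_pfx (rs : List Int) (hpos : ∀ s ∈ rs, 1 ≤ s) :
    ∀ (p : Int), 1 ≤ p → ∀ it : Int,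
      seqDigits (PySem.Int.floordiv it p) rs
        = ((pfx p rs).zip rs).map (fun q => PySem.Int.mod (PySem.Int.floordiv it q.1) q.2) := by
  induction rs with
  | nil => intro p _ it; rfl
  | cons s t ih =>
    intro p hp it
    have hs : 1 ≤ s := hpos s (by simp)
    have ht : ∀ x ∈ t, 1 ≤ x := fun x hx => hpos x (by simp [hx])
    simp only [seqDigits, pfx, List.zip_cons_cons, List.map_cons]
    congr 1
    rw [step_fdiv _ s hs, fdiv_fdiv it p s hp hs]
    exact ih ht (p * s) (by nlinarith) it

-- B's stride accumulator produces the prefix products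
lemma strideFold (rs : List Int) :
    ∀ (acc : List Int) (p : Int),
      (rs.foldl (fun (st : List Int × Int) s => (st.1 ++ [st.2], st.2 * s)) (acc, p)).1
        = acc ++ pfx p rs := by
  induction rs with
  | nil => intro acc p; simp [pfx]
  | cons s t ih => intro acc p; simp [List.foldl_cons, ih, pfx]

lemma zip_reverse {α β : Type} (a : List α) (b : List β) (h : a.length = b.length) :
    a.reverse.zip b.reverse = (a.zip b).reverse := by
  induction a generalizing b with
  | nil => cases b <;> simp at h ⊢
  | cons x xs ih =>
    cases b with
    | nil => simp at h
    | cons y ys =>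
      simp only [List.length_cons, Nat.add_right_cancel_iff] at h
      simp only [List.reverse_cons]
      rw [List.zip_append (by simp [h]), ih ys h]
      simp [List.zip_cons_cons]

-- A's loop over range(len(shape)) computes seqDigits (generalised over the start index)
lemma loopA (rs : List Int) (L : Nat) (hL : L = rs.length) :
    ∀ (m k : Nat) (ind : List Int) (r : Int), m = L - k → ind.length = L → k ≤ L →
      ((PySem.List.pyRange (k : Int) (L : Int) 1).foldl
        (fun (st : List Int × Int) n =>
          (st.1.set n.toNat (PySem.Int.mod st.2 (PySem.List.pyGetD rs n 0)),
           PySem.Int.floordiv (st.2 - PySem.Int.mod st.2 (PySem.List.pyGetD rs n 0))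
             (PySem.List.pyGetD rs n 0)))
        (ind, r)).1
      = ind.take k ++ seqDigits r (rs.drop k) := by
  intro m
  induction m with
  | zero =>
    intro k ind r hm hlen hk
    have hkL : k = L := by omega
    subst hkL
    rw [PySem.List.pyRange_one_eq_nil (by omega)]
    have hdrop : rs.drop k = [] := List.drop_eq_nil_of_le (by omega)
    have htake : ind.take k = ind := List.take_of_length_le (by omega)
    simp [hdrop, htake, seqDigits]
  | succ m ih =>
    intro k ind r hm hlen hk
    have hkL : k < L := by omega
    have hkrs : k < rs.length := by omega
    rw [PySem.List.pyRange_one_cons (by exact_mod_cast hkL)]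
    rw [List.foldl_cons]
    simp only
    have hget : PySem.List.pyGetD rs (k : Int) 0 = rs[k] := by
      rw [PySem.List.pyGetD_natCast]; exact List.getD_eq_getElem rs 0 hkrs
    have htoNat : ((k : Int)).toNat = k := by omega
    rw [hget, htoNat]
    have hcast : ((k : Int) + 1) = ((k + 1 : Nat) : Int) := by push_cast; ring
    rw [hcast, ih (k + 1) _ _ (by omega) (by simp [hlen]) (by omega)]
    have hset : (ind.set k (PySem.Int.mod r rs[k])).take (k + 1)
        = ind.take k ++ [PySem.Int.mod r rs[k]] := by
      rw [List.set_eq_take_cons_drop _ (show k < ind.length by omega), List.take_append]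
      have h1 : (ind.take k).length = k := by
        simp [List.length_take, Nat.min_eq_left (show k ≤ ind.length by omega)]
      rw [h1, List.take_take, Nat.min_eq_right (by omega),
          show k + 1 - k = 1 by omega]
      rfl
    have hdrop : rs.drop k = rs[k] :: rs.drop (k + 1) := List.drop_eq_getElem_cons hkrs
    rw [hset, hdrop]
    simp [seqDigits]

-- ===== VERDICT (by name: the statement is the Claim_ definition above) =====
theorem get_convolution_indices_spec : Claim_equal_get_convolution_indices := by
  intro iteration shape _ hpre
  unfold Spec_get_convolution_indices get_convolution_indices get_convolution_indices_alt
  by_cases h1 : shape.length = 1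
  · simp [h1]
  · simp only [h1, if_false]
    have hpos : ∀ s ∈ shape, 1 ≤ s := hpre.resolve_left h1
    have hposr : ∀ s ∈ shape.reverse, 1 ≤ s := by
      intro s hs; exact hpos s (List.mem_reverse.mp hs)
    have hA := loopA shape.reverse shape.length (by simp) shape.length 0 shape iteration
        (by omega) rfl (by omega)
    simp only [Nat.cast_zero, List.take_zero, List.drop_zero, List.nil_append] at hA
    rw [hA, strideFold shape.reverse [] 1, List.nil_append]
    have hs := seqDigits_eq_pfx shape.reverse hposr 1 (le_refl 1) iteration
    rw [show PySem.Int.floordiv iteration 1 = iteration by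
          rw [PySem.Int.floordiv_eq_ediv_of_pos (show (0:Int) < 1 by omega)]; simp] at hs
    rw [hs]
    have hz := zip_reverse (pfx 1 shape.reverse) shape.reverse (pfx_length 1 shape.reverse)
    rw [List.reverse_reverse] at hz
    rw [hz, List.map_reverse]
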